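-- pv_equiv track=rewrite | github.com/opa-oz/codewars-instanity | Catching Car Mileage Numbers/solution.py | decremental
-- ===== SOURCE A (Python) =====
-- def decremental(s):
--     if len(s) < 3:
--         return False
--     digits = [int(l) for l in s]
--     curr = digits[0]
--
--     for i in range(1, len(s)):
--         v = digits[i]
--         if v == curr - 1:
--             curr = v
--         else:
--             return False
--
--     return True
-- ===== SOURCE B (Python) =====
-- def decremental(s):
--     if len(s) < 3:
--         return False
--     digits = [int(l) for l in s]
--     first = digits[0]
--     return digits == list(range(first, first - len(s), -1))
-- ===== Notes on version B (the rewrite author's own statement) =====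
-- stated objective: alternative
-- what changed: Replaces the stepwise loop that tracks a running previous-digit variable and compares each digit against its predecessor minus one by generating the full expected strictly-decreasing sequence with range once and comparing lists.
import Mathlib
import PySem

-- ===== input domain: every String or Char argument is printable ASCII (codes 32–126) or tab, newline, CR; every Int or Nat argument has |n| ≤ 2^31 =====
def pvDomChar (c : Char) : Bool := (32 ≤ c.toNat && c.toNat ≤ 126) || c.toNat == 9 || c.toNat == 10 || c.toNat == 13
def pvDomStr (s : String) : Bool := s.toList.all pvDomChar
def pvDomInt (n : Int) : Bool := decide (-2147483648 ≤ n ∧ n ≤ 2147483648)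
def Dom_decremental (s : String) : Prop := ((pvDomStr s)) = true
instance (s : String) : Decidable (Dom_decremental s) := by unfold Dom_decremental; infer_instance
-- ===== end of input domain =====

-- B replaces A's stepwise previous-digit-tracking loop by generating the expected
-- strictly-decreasing sequence with range and comparing lists (alternative decomposition).

-- ===== PORT A =====
-- int(l) for a single character l; Pre_ guarantees this is a digit, so getD 0 is never the raising case
def pvDigit (c : Char) : Int := (PySem.Int.ofChars? [c]).getD 0

-- the stepwise loop of A over the remaining digits, carrying the previous digit
def pvDecLoop (rest : List Int) (curr : Int) : Bool :=
  match rest with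
  | [] => true
  | v :: t => if v = curr - 1 then pvDecLoop t v else false

def decremental (s : String) : Bool :=
  if PySem.Str.len s < 3 then false
  else
    let digits := s.toList.map pvDigit
    match digits with
    | [] => false          -- unreachable: len s ≥ 3
    | curr :: rest => pvDecLoop rest curr

-- ===== PORT B =====
def decremental_alt (s : String) : Bool :=
  if PySem.Str.len s < 3 then false
  else
    let digits := s.toList.map pvDigit
    let first := digits.headD 0
    decide (digits = PySem.List.pyRange first (first - PySem.Str.len s) (-1))

-- ===== PRECONDITION & SPEC =====
-- Pre_ excludes exactly the inputs where Python A raises ValueError: strings of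
-- length ≥ 3 containing a non-digit character (int(l) fails there); A returns on all others.
def Pre_decremental (s : String) : Prop :=
  s.toList.length < 3 ∨ s.toList.all (fun c => PySem.Chars.isdigit c) = true
instance (s : String) : Decidable (Pre_decremental s) := by unfold Pre_decremental; infer_instance
def pvWitness_decremental : String := "321"

def Spec_decremental (s : String) (out : Bool) : Prop := out = decremental_alt s
instance (s : String) (out : Bool) : Decidable (Spec_decremental s out) := by unfold Spec_decremental; infer_instance

-- ===== CLAIM (what is proved, stated in full; the proofs are below) =====
def Claim_equal_decremental : Prop := ∀ (s : String), Dom_decremental s → Pre_decremental s → Spec_decremental s (decremental s)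

-- ===== LEMMAS AND PROOFS =====

-- A's loop agrees with "the whole digit list equals the countdown range"
theorem pvDecLoop_eq_range (l : List Int) : ∀ curr : Int,
    pvDecLoop l curr
      = decide (curr :: l = PySem.List.pyRange curr (curr - (1 + l.length)) (-1)) := by
  induction l with
  | nil =>
    intro curr
    rw [PySem.List.pyRange_neg_one_cons (by simp),
        PySem.List.pyRange_neg_one_eq_nil (by simp)]
    simp [pvDecLoop]
  | cons v t ih =>
    intro curr
    have h1 : curr - (1 + ((v :: t).length : Int)) = (curr - 1) - (1 + t.length) := by
      simp only [List.length_cons]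
      push_cast
      ring
    rw [PySem.List.pyRange_neg_one_cons (show curr - (1 + ((v :: t).length : Int)) < curr by
          simp only [List.length_cons]; push_cast; omega), h1]
    by_cases h : v = curr - 1
    · rw [pvDecLoop, if_pos h, ih v]
      subst h
      simp [List.cons.injEq]
    · rw [PySem.List.pyRange_neg_one_cons (show (curr - 1) - (1 + (t.length : Int)) < curr - 1 by
            omega)]
      simp [pvDecLoop, h, List.cons.injEq]

-- ===== VERDICT (by name: the statement is the Claim_ definition above) =====
theorem decremental_spec : Claim_equal_decremental := by
  intro s _ _
  unfold Spec_decremental decremental decremental_alt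
  by_cases hlen : PySem.Str.len s < 3
  · rw [if_pos hlen, if_pos hlen]
  · rw [if_neg hlen, if_neg hlen]
    have hlen' : 3 ≤ ((s.length : Int)) := by
      simpa [PySem.Str.len_eq] using not_lt.mp hlen
    obtain ⟨curr, rest, hd⟩ : ∃ c r, s.toList.map pvDigit = c :: r := by
      cases h : s.toList.map pvDigit with
      | nil =>
        have h0 : (s.toList.map pvDigit).length = 0 := by rw [h]; rfl
        simp only [List.length_map, String.length_toList] at h0
        omega
      | cons c r => exact ⟨c, r, rfl⟩
    have hb : curr - PySem.Str.len s = curr - (1 + (rest.length : Int)) := by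
      have h1 := congrArg List.length hd
      simp [PySem.Str.len_eq] at h1 ⊢
      omega
    simp only [hd, List.headD_cons, hb]
    exact pvDecLoop_eq_range rest curr
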